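-- pv_equiv track=rewrite | github.com/epilectrik/voynich | phases/EFFICIENCY_REGIME_TEST/azc_based_a_clustering.py | decompose_token
-- ===== SOURCE A (Python) =====
-- from typing import Dict, List, Set, Tuple
--
-- KNOWN_PREFIXES = ['qo', 'ol', 'or', 'al', 'ar', 'ok', 'ot', 'ch', 'sh', 'ct', 'd', 's', 'y', 'o', 'a']
--
-- KNOWN_SUFFIXES = ['y', 'dy', 'n', 'in', 'iin', 'aiin', 'ain', 'l', 'm', 'r', 's', 'g', 'am', 'an']
--
-- def decompose_token(token: str) -> Dict[str, str]:
--     """Decompose token into PREFIX, MIDDLE, SUFFIX."""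
--     if not token or len(token) < 2:
--         return {'prefix': '', 'middle': token, 'suffix': ''}
--
--     original = token
--     prefix = ''
--     suffix = ''
--
--     for p in sorted(KNOWN_PREFIXES, key=len, reverse=True):
--         if token.startswith(p):
--             prefix = p
--             token = token[len(p):]
--             break
--
--     for s in sorted(KNOWN_SUFFIXES, key=len, reverse=True):
--         if token.endswith(s) and len(token) > len(s):
--             suffix = s
--             token = token[:-len(s)]
--             break
--
--     return {'prefix': prefix, 'middle': token, 'suffix': suffix}
-- ===== SOURCE B (Python) =====
-- KNOWN_PREFIXES = ['qo', 'ol', 'or', 'al', 'ar', 'ok', 'ot', 'ch', 'sh', 'ct', 'd', 's', 'y', 'o', 'a']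
--
-- KNOWN_SUFFIXES = ['y', 'dy', 'n', 'in', 'iin', 'aiin', 'ain', 'l', 'm', 'r', 's', 'g', 'am', 'an']
--
-- # Length-indexed affix tables, built once at import time.
-- _PREFIXES_BY_LEN = {}
-- for _p in KNOWN_PREFIXES:
--     _PREFIXES_BY_LEN.setdefault(len(_p), set()).add(_p)
-- _SUFFIXES_BY_LEN = {}
-- for _s in KNOWN_SUFFIXES:
--     _SUFFIXES_BY_LEN.setdefault(len(_s), set()).add(_s)
-- _PREFIX_LENS = sorted(_PREFIXES_BY_LEN, reverse=True)   # [2, 1]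
-- _SUFFIX_LENS = sorted(_SUFFIXES_BY_LEN, reverse=True)   # [4, 3, 2, 1]
--
-- def decompose_token(token: str):
--     """Decompose token into PREFIX, MIDDLE, SUFFIX."""
--     if len(token) < 2:
--         return {'prefix': '', 'middle': token, 'suffix': ''}
--
--     prefix = ''
--     suffix = ''
--
--     for l in _PREFIX_LENS:
--         head = token[:l]
--         if head in _PREFIXES_BY_LEN[l]:
--             prefix, token = head, token[l:]
--             break
--
--     for l in _SUFFIX_LENS:
--         if len(token) > l and token[-l:] in _SUFFIXES_BY_LEN[l]:
--             suffix, token = token[-l:], token[:-l]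
--             break
--
--     return {'prefix': prefix, 'middle': token, 'suffix': suffix}
-- ===== Notes on version B (the rewrite author's own statement) =====
-- stated objective: idiomatic
-- what changed: B replaces A's per-call length-sorting and linear first-match scans over the 15-prefix/14-suffix lists by length-indexed affix sets built once at import time, probing token[:l]/token[-l:] once per distinct affix length.
import Mathlib
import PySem

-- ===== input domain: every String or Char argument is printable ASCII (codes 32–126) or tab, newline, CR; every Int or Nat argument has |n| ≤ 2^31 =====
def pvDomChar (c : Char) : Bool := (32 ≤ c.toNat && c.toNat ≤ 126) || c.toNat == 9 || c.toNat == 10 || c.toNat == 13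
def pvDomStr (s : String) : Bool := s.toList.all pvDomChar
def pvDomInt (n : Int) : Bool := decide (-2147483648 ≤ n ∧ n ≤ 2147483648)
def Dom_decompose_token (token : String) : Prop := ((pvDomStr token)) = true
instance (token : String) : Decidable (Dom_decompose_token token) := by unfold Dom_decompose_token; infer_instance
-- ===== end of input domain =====

-- B replaces A's linear first-match scans over length-sorted affix lists by length-indexed
-- affix sets probed once per distinct length (objective: idiomatic; no speed claim).

-- ===== PORT A =====
def KNOWN_PREFIXES : List String :=
  ["qo", "ol", "or", "al", "ar", "ok", "ot", "ch", "sh", "ct", "d", "s", "y", "o", "a"]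

def KNOWN_SUFFIXES : List String :=
  ["y", "dy", "n", "in", "iin", "aiin", "ain", "l", "m", "r", "s", "g", "am", "an"]

-- A's first for-loop: first p (in the length-sorted order) with token.startswith(p); on the
-- break, prefix = p and token = token[len(p):]; falling off the loop leaves ('', token).
def aPrefixLoop : List String → String → String × String
  | [], tok => ("", tok)
  | p :: ps, tok =>
    if PySem.Str.startswith tok p then (p, PySem.Str.slice tok (some (PySem.Str.len p)) none)
    else aPrefixLoop ps tok

-- A's second for-loop: first s with token.endswith(s) and len(token) > len(s); on the break,
-- suffix = s and token = token[:-len(s)].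
def aSuffixLoop : List String → String → String × String
  | [], tok => ("", tok)
  | s :: ss, tok =>
    if PySem.Str.endswith tok s && decide (PySem.Str.len s < PySem.Str.len tok) then
      (s, PySem.Str.slice tok none (some (-(PySem.Str.len s))))
    else aSuffixLoop ss tok

def decompose_token (token : String) : List (String × String) :=
  if token = "" ∨ PySem.Str.len token < 2 then
    [("prefix", ""), ("middle", token), ("suffix", "")]
  else
    let pr := aPrefixLoop (PySem.List.sorted KNOWN_PREFIXES (fun p => PySem.Str.len p) true) token
    let sr := aSuffixLoop (PySem.List.sorted KNOWN_SUFFIXES (fun s => PySem.Str.len s) true) pr.2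
    [("prefix", pr.1), ("middle", sr.2), ("suffix", sr.1)]

-- ===== PORT B =====
-- the module-level table _PREFIXES_BY_LEN / _SUFFIXES_BY_LEN of Source B: length ↦ set of affixes
def byLen (xs : List String) (l : Nat) : PySem.Set String :=
  PySem.Set.ofList (xs.filter (fun x => PySem.Str.len x == (l : Int)))

def PREFIX_LENS : List Nat := [2, 1]
def SUFFIX_LENS : List Nat := [4, 3, 2, 1]

-- B's first loop: over distinct prefix lengths, probe token[:l] in the length-l set
def bPrefixLoop : List Nat → String → String × String
  | [], tok => ("", tok)
  | l :: ls, tok =>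
    let head := PySem.Str.slice tok none (some (l : Int))
    if (byLen KNOWN_PREFIXES l).contains head then
      (head, PySem.Str.slice tok (some (l : Int)) none)
    else bPrefixLoop ls tok

-- B's second loop: over distinct suffix lengths, guard len(token) > l, probe token[-l:]
def bSuffixLoop : List Nat → String → String × String
  | [], tok => ("", tok)
  | l :: ls, tok =>
    if decide ((l : Int) < PySem.Str.len tok)
        && (byLen KNOWN_SUFFIXES l).contains (PySem.Str.slice tok (some (-(l : Int))) none) then
      (PySem.Str.slice tok (some (-(l : Int))) none, PySem.Str.slice tok none (some (-(l : Int))))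
    else bSuffixLoop ls tok

def decompose_token_alt (token : String) : List (String × String) :=
  if PySem.Str.len token < 2 then
    [("prefix", ""), ("middle", token), ("suffix", "")]
  else
    let pr := bPrefixLoop PREFIX_LENS token
    let sr := bSuffixLoop SUFFIX_LENS pr.2
    [("prefix", pr.1), ("middle", sr.2), ("suffix", sr.1)]

-- ===== PRECONDITION & SPEC =====
def Spec_decompose_token (token : String) (out : List (String × String)) : Prop := out = decompose_token_alt token
instance (token : String) (out : List (String × String)) : Decidable (Spec_decompose_token token out) := by unfold Spec_decompose_token; infer_instance

-- ===== CLAIM (what is proved, stated in full; the proofs are below) =====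
def Claim_equal_decompose_token : Prop := ∀ (token : String), Dom_decompose_token token → Spec_decompose_token token (decompose_token token)

-- ===== LEMMAS AND PROOFS =====

-- first-match result of one same-length group, shared normal form of both loops
def grpPfx (L : Nat) (ps : List String) (tok : String) : Option (String × String) :=
  let head := PySem.Str.slice tok none (some (L : Int))
  if head ∈ ps then some (head, PySem.Str.slice tok (some (L : Int)) none) else none

def grpSfx (L : Nat) (ss : List String) (tok : String) : Option (String × String) :=
  let tail := PySem.Str.slice tok (some (-(L : Int))) none
  if (L : Int) < PySem.Str.len tok ∧ tail ∈ ss then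
    some (tail, PySem.Str.slice tok none (some (-(L : Int)))) else none

lemma startswith_iff_slice (tok p : String) (L : Nat) (hL : p.toList.length = L) :
    PySem.Str.startswith tok p = true ↔ PySem.Str.slice tok none (some (L : Int)) = p := by
  rw [← String.toList_inj]
  simp only [PySem.Str.startswith_eq, PySem.Chars.startswith_iff, PySem.Str.toList_slice,
    PySem.Chars.slice_eq_listSlice, PySem.List.slice_to_natCast, List.prefix_iff_eq_take, hL]
  exact eq_comm

lemma endswith_iff_slice (tok s : String) (L : Nat) (hL : s.toList.length = L) (hpos : 0 < L) :
    PySem.Str.endswith tok s = true ↔ PySem.Str.slice tok (some (-(L : Int))) none = s := by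
  rw [← String.toList_inj]
  simp only [PySem.Str.endswith_eq, PySem.Chars.endswith_iff, PySem.Str.toList_slice,
    PySem.Chars.slice_eq_listSlice, PySem.List.slice_from_neg_natCast _ _ hpos,
    List.suffix_iff_eq_drop, hL]
  exact eq_comm

lemma len_eq_toList_length (s : String) : PySem.Str.len s = (s.toList.length : Int) := by
  simp [PySem.Str.len_eq]

lemma aPrefixLoop_group (L : Nat) (ps qs : List String) (hL : ∀ p ∈ ps, p.toList.length = L)
    (tok : String) :
    aPrefixLoop (ps ++ qs) tok =
      match grpPfx L ps tok with
      | some r => r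
      | none => aPrefixLoop qs tok := by
  induction ps with
  | nil => simp [grpPfx]
  | cons p ps ih =>
    have hp := hL p (by simp)
    have hmem : ∀ x ∈ ps, x.toList.length = L := fun x hx => hL x (by simp [hx])
    by_cases h : PySem.Str.startswith tok p = true
    · have hsl : PySem.Str.slice tok none (some (L : Int)) = p :=
        (startswith_iff_slice tok p L hp).mp h
      simp only [List.cons_append, aPrefixLoop, h, if_true, grpPfx, hsl, List.mem_cons]
      simp [hp]
    · have hsl : ¬ PySem.Str.slice tok none (some (L : Int)) = p := fun he =>
        h ((startswith_iff_slice tok p L hp).mpr he)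
      simp only [List.cons_append, aPrefixLoop, h, ih hmem, grpPfx, List.mem_cons]
      simp [hsl]

lemma aSuffixLoop_group (L : Nat) (ss ts : List String) (hL : ∀ s ∈ ss, s.toList.length = L)
    (hpos : 0 < L) (tok : String) :
    aSuffixLoop (ss ++ ts) tok =
      match grpSfx L ss tok with
      | some r => r
      | none => aSuffixLoop ts tok := by
  induction ss with
  | nil => simp [grpSfx]
  | cons s ss ih =>
    have hs := hL s (by simp)
    have hmem : ∀ x ∈ ss, x.toList.length = L := fun x hx => hL x (by simp [hx])
    have hlens : PySem.Str.len s = (L : Int) := by rw [len_eq_toList_length, hs]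
    have hstep : aSuffixLoop (s :: ss ++ ts) tok =
        if PySem.Str.endswith tok s = true ∧ (L : Int) < PySem.Str.len tok then
          (s, PySem.Str.slice tok none (some (-(L : Int))))
        else aSuffixLoop (ss ++ ts) tok := by
      simp only [List.cons_append, aSuffixLoop, hlens]
      by_cases hc : PySem.Str.endswith tok s = true ∧ (L : Int) < PySem.Str.len tok
      · rw [if_pos (Bool.and_eq_true_iff.mpr ⟨hc.1, decide_eq_true hc.2⟩), if_pos hc]
      · rw [if_neg _, if_neg hc]
        intro hb
        rcases Bool.and_eq_true_iff.mp hb with ⟨h1, h2⟩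
        exact hc ⟨h1, of_decide_eq_true h2⟩
    rw [hstep, ih hmem]
    by_cases hlen : (L : Int) < PySem.Str.len tok
    · by_cases hend : PySem.Str.endswith tok s = true
      · have hsl := (endswith_iff_slice tok s L hs hpos).mp hend
        rw [if_pos ⟨hend, hlen⟩]
        unfold grpSfx
        rw [if_pos ⟨hlen, by rw [hsl]; exact List.mem_cons_self⟩, hsl]
      · have hne : ¬ (PySem.Str.slice tok (some (-(L : Int))) none = s) := fun he =>
          hend ((endswith_iff_slice tok s L hs hpos).mpr he)
        rw [if_neg (fun hc => hend hc.1)]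
        unfold grpSfx
        simp only [List.mem_cons, hne, false_or]
    · rw [if_neg (fun hc => hlen hc.2)]
      unfold grpSfx
      rw [if_neg (fun hc => hlen hc.1), if_neg (fun hc => hlen hc.1)]

lemma bPrefixLoop_step (l : Nat) (ls : List Nat) (tok : String) :
    bPrefixLoop (l :: ls) tok =
      match grpPfx l (byLen KNOWN_PREFIXES l) tok with
      | some r => r
      | none => bPrefixLoop ls tok := by
  simp only [bPrefixLoop, grpPfx]
  by_cases h : PySem.Str.slice tok none (some (l : Int)) ∈ byLen KNOWN_PREFIXES l
  · rw [if_pos h, if_pos ((PySem.Set.contains_iff _ _).mpr h)]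
  · rw [if_neg h, if_neg (fun hb => h ((PySem.Set.contains_iff _ _).mp hb))]

lemma bSuffixLoop_step (l : Nat) (ls : List Nat) (tok : String) :
    bSuffixLoop (l :: ls) tok =
      match grpSfx l (byLen KNOWN_SUFFIXES l) tok with
      | some r => r
      | none => bSuffixLoop ls tok := by
  simp only [bSuffixLoop, grpSfx, Bool.and_eq_true, decide_eq_true_eq]
  by_cases h : (l : Int) < PySem.Str.len tok ∧
      PySem.Str.slice tok (some (-(l : Int))) none ∈ byLen KNOWN_SUFFIXES l
  · rw [if_pos h, if_pos ⟨h.1, (PySem.Set.contains_iff _ _).mpr h.2⟩]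
  · rw [if_neg h, if_neg (fun hb => h ⟨hb.1, (PySem.Set.contains_iff _ _).mp hb.2⟩)]

lemma prefix_loops_eq (tok : String) :
    aPrefixLoop (PySem.List.sorted KNOWN_PREFIXES (fun p => PySem.Str.len p) true) tok =
      bPrefixLoop PREFIX_LENS tok := by
  have hsorted : PySem.List.sorted KNOWN_PREFIXES (fun p => PySem.Str.len p) true =
      (byLen KNOWN_PREFIXES 2 ++ (byLen KNOWN_PREFIXES 1 ++ [])) := by decide
  rw [hsorted,
    aPrefixLoop_group 2 (byLen KNOWN_PREFIXES 2) _ (by decide) tok,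
    aPrefixLoop_group 1 (byLen KNOWN_PREFIXES 1) [] (by decide) tok]
  show _ = bPrefixLoop (2 :: 1 :: []) tok
  rw [bPrefixLoop_step, bPrefixLoop_step]
  cases grpPfx 2 (byLen KNOWN_PREFIXES 2) tok <;>
    cases grpPfx 1 (byLen KNOWN_PREFIXES 1) tok <;> rfl

lemma suffix_loops_eq (tok : String) :
    aSuffixLoop (PySem.List.sorted KNOWN_SUFFIXES (fun s => PySem.Str.len s) true) tok =
      bSuffixLoop SUFFIX_LENS tok := by
  have hsorted : PySem.List.sorted KNOWN_SUFFIXES (fun s => PySem.Str.len s) true =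
      (byLen KNOWN_SUFFIXES 4 ++ (byLen KNOWN_SUFFIXES 3 ++ (byLen KNOWN_SUFFIXES 2 ++
        (byLen KNOWN_SUFFIXES 1 ++ [])))) := by decide
  rw [hsorted,
    aSuffixLoop_group 4 (byLen KNOWN_SUFFIXES 4) _ (by decide) (by decide) tok,
    aSuffixLoop_group 3 (byLen KNOWN_SUFFIXES 3) _ (by decide) (by decide) tok,
    aSuffixLoop_group 2 (byLen KNOWN_SUFFIXES 2) _ (by decide) (by decide) tok,
    aSuffixLoop_group 1 (byLen KNOWN_SUFFIXES 1) [] (by decide) (by decide) tok]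
  show _ = bSuffixLoop (4 :: 3 :: 2 :: 1 :: []) tok
  rw [bSuffixLoop_step, bSuffixLoop_step, bSuffixLoop_step, bSuffixLoop_step]
  cases grpSfx 4 (byLen KNOWN_SUFFIXES 4) tok <;>
    cases grpSfx 3 (byLen KNOWN_SUFFIXES 3) tok <;>
    cases grpSfx 2 (byLen KNOWN_SUFFIXES 2) tok <;>
    cases grpSfx 1 (byLen KNOWN_SUFFIXES 1) tok <;> rfl

lemma guard_eq (token : String) :
    (token = "" ∨ PySem.Str.len token < 2) ↔ PySem.Str.len token < 2 := by
  constructor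
  · rintro (h | h)
    · subst h; decide
    · exact h
  · exact Or.inr

-- ===== VERDICT (by name: the statement is the Claim_ definition above) =====
theorem decompose_token_spec : Claim_equal_decompose_token := by
  intro token _
  unfold Spec_decompose_token decompose_token decompose_token_alt
  rw [if_congr (guard_eq token) rfl rfl]
  by_cases h : PySem.Str.len token < 2
  · rw [if_pos h, if_pos h]
  · rw [if_neg h, if_neg h]
    simp only [prefix_loops_eq, suffix_loops_eq]
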